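-- pv_equiv track=rewrite | github.com/jfedgerton/usaid_knockout | R/entity_resolution_step4a_review_fuzzy.py | contains_country_swap
-- ===== SOURCE A (Python) =====
-- COUNTRY_PAIRS_FALSE_POSITIVE = [
--     ("australia", "austria"),
--     ("slovakia", "slovenia"),
--     ("colombia", "cambodia"),
--     ("niger", "nigeria"),
--     ("mali", "malawi"),
--     ("guinea", "guinea bissau"),
--     ("congo", "comoros"),
--     ("iran", "iraq"),
--     ("sudan", "south sudan"),  # These ARE different countries
--     ("timor", "timore"),
-- ]
--
-- def contains_country_swap(name_a, name_b):
--     """Check if the difference between two names is just a country name swap."""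
--     words_a = set(name_a.split())
--     words_b = set(name_b.split())
--     diff_a = words_a - words_b
--     diff_b = words_b - words_a
--
--     # Check each known false-positive country pair
--     for c1, c2 in COUNTRY_PAIRS_FALSE_POSITIVE:
--         # Check if the only difference is this country pair
--         if (c1 in diff_a and c2 in diff_b) or (c2 in diff_a and c1 in diff_b):
--             return True
--
--     # Also catch: names identical except for a country name at the end
--     # e.g., "ministry of health sudan" vs "ministry of health yemen"
--     if len(diff_a) == 1 and len(diff_b) == 1:
--         word_a = list(diff_a)[0]
--         word_b = list(diff_b)[0]
--         # If both differing words are country-ish (short, at end of name)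
--         if name_a.endswith(word_a) and name_b.endswith(word_b):
--             # These are likely different country-specific entities
--             return True
--
--     return False
-- ===== SOURCE B (Python) =====
-- COUNTRY_PAIRS_FALSE_POSITIVE = [
--     ("australia", "austria"),
--     ("slovakia", "slovenia"),
--     ("colombia", "cambodia"),
--     ("niger", "nigeria"),
--     ("mali", "malawi"),
--     ("guinea", "guinea bissau"),
--     ("congo", "comoros"),
--     ("iran", "iraq"),
--     ("sudan", "south sudan"),
--     ("timor", "timore"),
-- ]
--
-- SWAP_KEYS = {frozenset(pair) for pair in COUNTRY_PAIRS_FALSE_POSITIVE}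
--
--
-- def contains_country_swap(name_a, name_b):
--     """Check if the difference between two names is just a country name swap."""
--     words_a = name_a.split()
--     words_b = name_b.split()
--     # ordered symmetric difference, kept as deduplicated lists
--     diff_a = list(dict.fromkeys(w for w in words_a if w not in words_b))
--     diff_b = list(dict.fromkeys(w for w in words_b if w not in words_a))
--
--     # walk the cross product of differing words, matching unordered pairs
--     for x in diff_a:
--         for y in diff_b:
--             if frozenset((x, y)) in SWAP_KEYS:
--                 return True
--
--     if len(diff_a) == 1 == len(diff_b) and name_a.endswith(diff_a[0]) and name_b.endswith(diff_b[0]):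
--         return True
--
--     return False
-- ===== Notes on version B (the rewrite author's own statement) =====
-- stated objective: alternative
-- what changed: B computes the word differences as ordered deduplicated lists and walks their cross product, matching each candidate (x,y) as an order-normalized unordered key against a precomputed set of frozenset keys, instead of A's scan over the 10 country pairs testing set membership of both orientations.
import Mathlib
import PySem

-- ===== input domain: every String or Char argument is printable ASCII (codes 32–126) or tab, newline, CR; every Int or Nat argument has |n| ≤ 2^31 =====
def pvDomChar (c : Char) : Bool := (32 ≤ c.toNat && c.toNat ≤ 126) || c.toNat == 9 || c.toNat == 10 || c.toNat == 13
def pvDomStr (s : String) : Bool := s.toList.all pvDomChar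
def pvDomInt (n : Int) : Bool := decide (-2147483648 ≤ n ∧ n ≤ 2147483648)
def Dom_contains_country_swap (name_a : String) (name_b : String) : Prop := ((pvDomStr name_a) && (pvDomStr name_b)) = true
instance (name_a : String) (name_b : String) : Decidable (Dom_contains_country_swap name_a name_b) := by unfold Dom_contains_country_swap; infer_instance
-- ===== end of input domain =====

-- B keeps no pair scan: it walks the cross product of the two ordered word-difference lists and matches each (x,y) as an unordered key against a precomputed set of frozenset-style keys (alternative data structure, same results).


-- ===== PORT A =====
-- module constant COUNTRY_PAIRS_FALSE_POSITIVE
def COUNTRY_PAIRS_FALSE_POSITIVE : List (String × String) :=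
  [("australia", "austria"),
   ("slovakia", "slovenia"),
   ("colombia", "cambodia"),
   ("niger", "nigeria"),
   ("mali", "malawi"),
   ("guinea", "guinea bissau"),
   ("congo", "comoros"),
   ("iran", "iraq"),
   ("sudan", "south sudan"),
   ("timor", "timore")]

-- the for-loop with early 'return True' over the pairs, as List.any
def contains_country_swap (name_a : String) (name_b : String) : Bool :=
  let words_a := PySem.Set.ofList (PySem.Str.split₀ name_a)
  let words_b := PySem.Set.ofList (PySem.Str.split₀ name_b)
  let diff_a := PySem.Set.diff words_a words_b
  let diff_b := PySem.Set.diff words_b words_a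
  if COUNTRY_PAIRS_FALSE_POSITIVE.any (fun p =>
       (diff_a.contains p.1 && diff_b.contains p.2) || (diff_a.contains p.2 && diff_b.contains p.1)) then
    true
  else if diff_a.length = 1 && diff_b.length = 1 then
    let word_a := PySem.List.pyGetD diff_a 0 ""
    let word_b := PySem.List.pyGetD diff_b 0 ""
    if PySem.Str.endswith name_a word_a && PySem.Str.endswith name_b word_b then true
    else false
  else false

-- ===== PORT B =====
-- frozenset((x, y)) ported as the order-normalized pair (exact here: every key is a
-- 2-element frozenset, and equality of such frozensets is equality of normalized pairs,
-- while a degenerate frozenset((x, x)) never equals a 2-element key)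
def swapKey (x : String) (y : String) : String × String := if x ≤ y then (x, y) else (y, x)

-- module constant SWAP_KEYS (the set comprehension over the pairs)
def SWAP_KEYS : PySem.Set (String × String) :=
  PySem.Set.ofList (COUNTRY_PAIRS_FALSE_POSITIVE.map (fun pair => swapKey pair.1 pair.2))

-- cross-product walk with early 'return True', as nested List.any
def contains_country_swap_alt (name_a : String) (name_b : String) : Bool :=
  let words_a := PySem.Str.split₀ name_a
  let words_b := PySem.Str.split₀ name_b
  let diff_a := PySem.List.dedup (words_a.filter (fun w => !words_b.contains w))
  let diff_b := PySem.List.dedup (words_b.filter (fun w => !words_a.contains w))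
  if diff_a.any (fun x => diff_b.any (fun y => SWAP_KEYS.contains (swapKey x y))) then
    true
  else
    match diff_a, diff_b with
    | [x], [y] => PySem.Str.endswith name_a x && PySem.Str.endswith name_b y
    | _, _ => false

-- ===== PRECONDITION & SPEC =====
def Spec_contains_country_swap (name_a : String) (name_b : String) (out : Bool) : Prop := out = contains_country_swap_alt name_a name_b
instance (name_a : String) (name_b : String) (out : Bool) : Decidable (Spec_contains_country_swap name_a name_b out) := by unfold Spec_contains_country_swap; infer_instance

-- ===== CLAIM (what is proved, stated in full; the proofs are below) =====
def Claim_equal_contains_country_swap : Prop := ∀ (name_a : String) (name_b : String), Dom_contains_country_swap name_a name_b → Spec_contains_country_swap name_a name_b (contains_country_swap name_a name_b)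

-- ===== LEMMAS AND PROOFS =====

-- deduplication (first occurrences) commutes with filtering
lemma foldl_add_filter {α : Type} [BEq α] [LawfulBEq α] (p : α → Bool) (xs acc : List α) :
    List.foldl PySem.Set.add (acc.filter p) (xs.filter p)
      = (List.foldl PySem.Set.add acc xs).filter p := by
  induction xs generalizing acc with
  | nil => rfl
  | cons x xs ih =>
    by_cases hx : p x = true
    · simp only [List.filter_cons, hx, if_pos, List.foldl_cons]
      have hadd : PySem.Set.add (acc.filter p) x = (PySem.Set.add acc x).filter p := by
        simp only [PySem.Set.add, PySem.Set.contains, List.contains_eq_mem,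
          List.mem_filter, hx, and_true]
        split_ifs with h
        · rfl
        · simp [List.filter_append, hx]
      rw [hadd, ih]
    · rw [Bool.not_eq_true] at hx
      simp only [List.filter_cons, hx, Bool.false_eq_true, if_false, List.foldl_cons]
      rw [← ih]
      congr 1
      simp only [PySem.Set.add, PySem.Set.contains]
      split_ifs with h
      · rfl
      · simp [List.filter_append, hx]

lemma ofList_filter {α : Type} [BEq α] [LawfulBEq α] (p : α → Bool) (xs : List α) :
    PySem.Set.ofList (xs.filter p) = (PySem.Set.ofList xs).filter p := by
  have := foldl_add_filter p xs []
  simpa [PySem.Set.ofList, PySem.Set.empty] using this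

-- A's set difference IS B's dedup-after-filter difference list
lemma diff_eq_dedup_filter (wa wb : List String) :
    PySem.Set.diff (PySem.Set.ofList wa) (PySem.Set.ofList wb)
      = PySem.List.dedup (wa.filter (fun w => !wb.contains w)) := by
  have hfun : (fun x => !(PySem.Set.ofList wb).contains x) = (fun w : String => !wb.contains w) := by
    funext x
    simp [PySem.Set.contains, List.contains_eq_mem, PySem.Set.mem_ofList]
  rw [PySem.List.dedup, ofList_filter, PySem.Set.diff, hfun]

-- the normalized pair determines the unordered pair
lemma swapKey_eq_iff (x y c d : String) :
    swapKey x y = swapKey c d ↔ (x = c ∧ y = d) ∨ (x = d ∧ y = c) := by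
  unfold swapKey
  split_ifs with h1 h2 h2 <;> simp only [Prod.mk.injEq] <;> constructor
  · exact fun h => Or.inl h
  · rintro (⟨rfl, rfl⟩ | ⟨rfl, rfl⟩)
    · exact ⟨rfl, rfl⟩
    · exact ⟨le_antisymm h1 h2, le_antisymm h2 h1⟩
  · exact fun ⟨h3, h4⟩ => Or.inr ⟨h3, h4⟩
  · rintro (⟨rfl, rfl⟩ | ⟨rfl, rfl⟩)
    · exact absurd h1 h2
    · exact ⟨rfl, rfl⟩
  · exact fun ⟨h3, h4⟩ => Or.inr ⟨h4, h3⟩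
  · rintro (⟨rfl, rfl⟩ | ⟨rfl, rfl⟩)
    · exact absurd h2 h1
    · exact ⟨rfl, rfl⟩
  · exact fun ⟨h3, h4⟩ => Or.inl ⟨h4, h3⟩
  · rintro (⟨rfl, rfl⟩ | ⟨rfl, rfl⟩)
    · exact ⟨rfl, rfl⟩
    · exact absurd ((le_total x y).resolve_left h1) h2

-- A's pair scan equals B's cross-product walk
lemma loops_agree (da db : List String) :
    COUNTRY_PAIRS_FALSE_POSITIVE.any (fun p =>
      (PySem.Set.contains da p.1 && PySem.Set.contains db p.2) ||
        (PySem.Set.contains da p.2 && PySem.Set.contains db p.1))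
    = da.any (fun x => db.any (fun y => SWAP_KEYS.contains (swapKey x y))) := by
  rw [Bool.eq_iff_iff]
  simp only [List.any_eq_true, Bool.or_eq_true, Bool.and_eq_true, List.contains_eq_mem,
    decide_eq_true_eq, SWAP_KEYS, PySem.Set.contains, PySem.Set.mem_ofList, List.mem_map]
  constructor
  · rintro ⟨p, hp, ⟨h1, h2⟩ | ⟨h1, h2⟩⟩
    · exact ⟨p.1, h1, p.2, h2, p, hp, rfl⟩
    · exact ⟨p.2, h1, p.1, h2, p, hp, (swapKey_eq_iff ..).mpr (Or.inr ⟨rfl, rfl⟩)⟩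
  · rintro ⟨x, hx, y, hy, p, hp, heq⟩
    rcases (swapKey_eq_iff ..).mp heq with ⟨h1, h2⟩ | ⟨h1, h2⟩
    · exact ⟨p, hp, Or.inl ⟨h1 ▸ hx, h2 ▸ hy⟩⟩
    · exact ⟨p, hp, Or.inr ⟨h2 ▸ hx, h1 ▸ hy⟩⟩

-- ===== VERDICT (by name: the statement is the Claim_ definition above) =====
theorem contains_country_swap_spec : Claim_equal_contains_country_swap := by
  intro na nb _
  unfold Spec_contains_country_swap contains_country_swap contains_country_swap_alt
  simp only [diff_eq_dedup_filter]
  generalize PySem.List.dedup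
    (List.filter (fun w => !(PySem.Str.split₀ nb).contains w) (PySem.Str.split₀ na)) = da
  generalize PySem.List.dedup
    (List.filter (fun w => !(PySem.Str.split₀ na).contains w) (PySem.Str.split₀ nb)) = db
  rw [loops_agree]
  rcases da with _ | ⟨x, _ | ⟨x', da⟩⟩ <;> rcases db with _ | ⟨y, _ | ⟨y', db⟩⟩ <;>
    simp [PySem.List.pyGetD_zero_cons]
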